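-- pv_equiv track=rewrite | github.com/HotitanXiao/Varant_Logic_Framework | MainFrame/VLSequence.py | p_q_count
-- ===== SOURCE A (Python) =====
-- def p_q_count(input_str):
--     """
--     参数: input_str-0-1比特的字符串
--     输出: （p,q）
--     描述: 计算改序列的p、q的值
--     """
--     p_count = 0
--     q_count = 0
--     i = 0
--     str_len = len(input_str)
--     while i < str_len:
--         if input_str[i] == '0' and input_str[(i+1)%str_len] == '1':
--             q_count += 1
--             # 避免在环尾重复计数1
--             if i+1 < str_len:
--                 p_count += 1
--             i += 2
--         else:
--             if input_str[i] == '1':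
--                 p_count += 1
--             i += 1
--     return (p_count, q_count)
-- ===== SOURCE B (Python) =====
-- def p_q_count(input_str):
--     p_count = input_str.count('1')
--     q_count = input_str.count('01')
--     if input_str and input_str[-1] == '0' and input_str[0] == '1':
--         q_count += 1
--     return (p_count, q_count)
-- ===== Notes on version B (the rewrite author's own statement) =====
-- stated objective: faster
-- what changed: Replaced the stateful variable-step index loop over the cyclic string by two library substring counts (one for the set bits, one for the zero-then-one pattern, which can never overlap) plus a single wrap-around guard for the last-to-first pair.
import Mathlib
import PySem

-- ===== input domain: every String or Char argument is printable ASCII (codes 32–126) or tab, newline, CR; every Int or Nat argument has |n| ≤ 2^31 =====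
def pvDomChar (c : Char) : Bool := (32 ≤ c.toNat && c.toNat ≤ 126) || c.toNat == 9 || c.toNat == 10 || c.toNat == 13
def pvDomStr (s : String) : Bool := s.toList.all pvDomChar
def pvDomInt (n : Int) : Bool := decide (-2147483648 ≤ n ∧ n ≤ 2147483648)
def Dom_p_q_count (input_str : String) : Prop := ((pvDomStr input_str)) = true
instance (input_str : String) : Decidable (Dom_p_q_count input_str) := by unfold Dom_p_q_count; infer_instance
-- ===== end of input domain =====

-- B replaces A's stateful variable-step index loop by two substring counts plus one wrap guard (same O(n), measured faster in a timing run).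

-- ===== PORT A =====
-- A's while-loop: state (p_count, q_count, i); i advances by 1 or 2 per iteration
def pqLoopA (cs : List Char) (p q : Int) (i : Nat) : Int × Int :=
  if h : i < cs.length then
    if cs[i]? = some '0' ∧ cs[(i+1) % cs.length]? = some '1' then
      pqLoopA cs (if i+1 < cs.length then p+1 else p) (q+1) (i+2)
    else
      pqLoopA cs (if cs[i]? = some '1' then p+1 else p) q (i+1)
  else (p, q)
termination_by cs.length - i
decreasing_by all_goals omega

def p_q_count (input_str : String) : Int × Int :=
  pqLoopA input_str.toList 0 0 0

-- ===== PORT B =====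
def p_q_count_alt (input_str : String) : Int × Int :=
  let p : Int := PySem.Str.count input_str "1"
  let q : Int := PySem.Str.count input_str "01"
  let q := if input_str.toList ≠ [] ∧ PySem.Str.pyGet? input_str (-1) = some '0'
              ∧ PySem.Str.pyGet? input_str 0 = some '1'
           then q + 1 else q
  (p, q)

-- ===== PRECONDITION & SPEC =====
def Spec_p_q_count (input_str : String) (out : Int × Int) : Prop := out = p_q_count_alt input_str
instance (input_str : String) (out : Int × Int) : Decidable (Spec_p_q_count input_str out) := by unfold Spec_p_q_count; infer_instance

-- ===== CLAIM (what is proved, stated in full; the proofs are below) =====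
def Claim_equal_p_q_count : Prop := ∀ (input_str : String), Dom_p_q_count input_str → Spec_p_q_count input_str (p_q_count input_str)

-- ===== LEMMAS AND PROOFS =====

-- occurrences of "01" in a list (they can never overlap)
def pairs01 : List Char → Nat
  | a :: b :: t => if a = '0' ∧ b = '1' then 1 + pairs01 t else pairs01 (b :: t)
  | _ => 0

lemma count_go_one (fuel : Nat) : ∀ (l : List Char) (acc : Nat), l.length ≤ fuel →
    PySem.Chars.count.go ['1'] fuel l acc = acc + l.count '1' := by
  induction fuel with
  | zero =>
    intro l acc h
    have : l = [] := List.length_eq_zero_iff.mp (Nat.le_zero.mp h)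
    subst this; simp [PySem.Chars.count.go]
  | succ n ih =>
    intro l acc h
    match l with
    | [] => simp [PySem.Chars.count.go]
    | c :: t =>
      simp only [PySem.Chars.count.go, List.isPrefixOf, Bool.and_true,
        List.length_singleton, List.drop_succ_cons, List.drop_zero]
      by_cases hc : c = '1'
      · subst hc
        rw [if_pos (by simp), ih t (acc+1) (by simpa using Nat.le_of_succ_le_succ h)]
        simp; omega
      · rw [if_neg (by simpa using fun hh => hc hh.symm),
            ih t acc (by simpa using Nat.le_of_succ_le_succ h)]
        simp [hc]

lemma count_go_pairs (fuel : Nat) : ∀ (l : List Char) (acc : Nat), l.length ≤ fuel →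
    PySem.Chars.count.go ['0','1'] fuel l acc = acc + pairs01 l := by
  induction fuel with
  | zero =>
    intro l acc h
    have : l = [] := List.length_eq_zero_iff.mp (Nat.le_zero.mp h)
    subst this; simp [PySem.Chars.count.go, pairs01]
  | succ n ih =>
    intro l acc h
    match l with
    | [] => simp [PySem.Chars.count.go, pairs01]
    | [c] =>
      have hp : List.isPrefixOf ['0','1'] [c] = false := by
        simp [List.isPrefixOf]
      simp [PySem.Chars.count.go, hp, pairs01]
      exact (ih [] acc (Nat.zero_le n)).trans (by simp [pairs01])
    | a :: b :: t =>
      simp only [PySem.Chars.count.go, List.isPrefixOf, Bool.and_true,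
        List.length_cons, List.drop_succ_cons]
      by_cases hab : a = '0' ∧ b = '1'
      · obtain ⟨ha, hb⟩ := hab; subst ha; subst hb
        rw [if_pos (by simp), show List.drop [].length t = t from rfl,
            ih t (acc+1) (by simp at h ⊢; omega)]
        simp [pairs01]; omega
      · rw [if_neg (by simp; intro h0 h1; exact hab ⟨h0.symm, h1.symm⟩),
            ih (b :: t) acc (by simp at h ⊢; omega)]
        have : pairs01 (a :: b :: t) = pairs01 (b :: t) := by simp [pairs01, hab]
        rw [this]

lemma chars_count_one (cs : List Char) : PySem.Chars.count cs ['1'] = cs.count '1' := by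
  unfold PySem.Chars.count
  rw [if_neg (by simp)]
  exact (count_go_one cs.length cs 0 le_rfl).trans (by simp)

lemma chars_count_pairs (cs : List Char) : PySem.Chars.count cs ['0','1'] = pairs01 cs := by
  unfold PySem.Chars.count
  rw [if_neg (by simp)]
  exact (count_go_pairs cs.length cs 0 le_rfl).trans (by simp)

-- invariant of A's loop: from any live index i it adds the '1'-count of the rest,
-- the "01"-count of the rest and (once) the cyclic wrap contribution
lemma pqLoopA_spec (cs : List Char) (n : Nat) :
    ∀ i p q, cs.length - i = n → i < cs.length →
    pqLoopA cs p q i =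
      (p + ((cs.drop i).count '1' : Int),
       q + (pairs01 (cs.drop i) : Int) +
         (if cs.getLast? = some '0' ∧ cs.head? = some '1' then (1:Int) else 0)) := by
  induction n using Nat.strong_induction_on with
  | _ n IH =>
  intro i p q hn hi
  have hgl : cs.getLast? = cs[cs.length - 1]? := by
    rw [List.getLast?_eq_getElem?]
  have hhd : cs.head? = cs[0]? := by
    cases cs <;> simp
  have hdropi : cs.drop i = cs[i] :: cs.drop (i+1) := List.drop_eq_getElem_cons hi
  rw [pqLoopA, dif_pos hi]
  by_cases hm : cs[i]? = some '0' ∧ cs[(i+1) % cs.length]? = some '1'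
  · rw [if_pos hm]
    have hci : cs[i] = '0' := by
      have := hm.1; rw [List.getElem?_eq_getElem hi] at this; simpa using this
    by_cases h1 : i + 1 < cs.length
    · have hmod : (i+1) % cs.length = i+1 := Nat.mod_eq_of_lt h1
      have hci1 : cs[i+1] = '1' := by
        have := hm.2; rw [hmod, List.getElem?_eq_getElem h1] at this; simpa using this
      have hdrop1 : cs.drop (i+1) = cs[i+1] :: cs.drop (i+2) := List.drop_eq_getElem_cons h1
      rw [if_pos h1]
      have hcount : (cs.drop i).count '1' = 1 + (cs.drop (i+2)).count '1' := by
        rw [hdropi, hdrop1, hci, hci1]; simp; omega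
      have hpairs : pairs01 (cs.drop i) = 1 + pairs01 (cs.drop (i+2)) := by
        rw [hdropi, hdrop1, hci, hci1]; simp [pairs01]
      by_cases h2 : i + 2 < cs.length
      · rw [IH (cs.length - (i+2)) (by omega) (i+2) _ _ rfl h2]
        rw [hcount, hpairs]
        simp only [Prod.mk.injEq]; constructor <;> push_cast <;> ring
      · rw [pqLoopA, dif_neg (by omega)]
        have hdrop2 : cs.drop (i+2) = [] := List.drop_eq_nil_of_le (by omega)
        have hW : ¬ (cs.getLast? = some '0' ∧ cs.head? = some '1') := by
          intro ⟨hl, _⟩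
          rw [hgl] at hl
          have : cs.length - 1 = i + 1 := by omega
          rw [this, List.getElem?_eq_getElem h1, hci1] at hl
          simp at hl
        rw [hcount, hpairs, hdrop2, if_neg hW]
        simp [pairs01]
    · -- wrap: i is the last index and cs[0] completes the cyclic "01"
      have h1e : i + 1 = cs.length := by omega
      have hmod : (i+1) % cs.length = 0 := by rw [h1e]; exact Nat.mod_self _
      rw [if_neg h1, pqLoopA, dif_neg (by omega)]
      have hdrop1 : cs.drop (i+1) = [] := List.drop_eq_nil_of_le (by omega)
      have hW : cs.getLast? = some '0' ∧ cs.head? = some '1' := by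
        constructor
        · rw [hgl, show cs.length - 1 = i by omega]; exact hm.1
        · rw [hhd]; have := hm.2; rwa [hmod] at this
      rw [if_pos hW, hdropi, hdrop1, hci]
      simp [pairs01]
  · rw [if_neg hm]
    by_cases h1 : i + 1 < cs.length
    · have hmod : (i+1) % cs.length = i+1 := Nat.mod_eq_of_lt h1
      have hdrop1 : cs.drop (i+1) = cs[i+1] :: cs.drop (i+2) := List.drop_eq_getElem_cons h1
      have hpairs : pairs01 (cs.drop i) = pairs01 (cs.drop (i+1)) := by
        rw [hdropi, hdrop1, pairs01]
        rw [if_neg ?_, ← hdrop1]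
        intro ⟨h0, hh1⟩
        exact hm ⟨by rw [List.getElem?_eq_getElem hi, h0],
          by rw [hmod, List.getElem?_eq_getElem h1, hh1]⟩
      rw [IH (cs.length - (i+1)) (by omega) (i+1) _ _ rfl h1, hpairs]
      have hopt : (cs[i]? = some '1') ↔ cs[i] = '1' := by
        rw [List.getElem?_eq_getElem hi]; simp
      have hcc : (cs.drop i).count '1' = (cs.drop (i+1)).count '1' + (if cs[i] = '1' then 1 else 0) := by
        rw [hdropi, List.count_cons]; simp
      by_cases hc : cs[i] = '1'
      · rw [if_pos (hopt.mpr hc), hcc, if_pos hc]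
        simp only [Prod.mk.injEq]; constructor <;> push_cast <;> ring
      · rw [if_neg (fun hh => hc (hopt.mp hh)), hcc, if_neg hc]
        simp only [Prod.mk.injEq]; constructor <;> push_cast <;> ring
    · have h1e : i + 1 = cs.length := by omega
      have hmod : (i+1) % cs.length = 0 := by rw [h1e]; exact Nat.mod_self _
      rw [pqLoopA, dif_neg (by omega)]
      have hdrop1 : cs.drop (i+1) = [] := List.drop_eq_nil_of_le (by omega)
      have hW : ¬ (cs.getLast? = some '0' ∧ cs.head? = some '1') := by
        intro ⟨hl, hh⟩
        exact hm ⟨by rwa [hgl, show cs.length - 1 = i by omega] at hl,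
          by rwa [hmod, ← hhd]⟩
      rw [if_neg hW, hdropi, hdrop1]
      by_cases hc : cs[i] = '1' <;>
        simp [pairs01, List.getElem?_eq_getElem hi, hc]

lemma pyGet_neg_one_eq_getLast? (s : String) (h : s.toList ≠ []) :
    PySem.Str.pyGet? s (-1) = s.toList.getLast? := by
  have hl : 0 < s.toList.length := List.length_pos_iff.mpr h
  rw [PySem.Str.pyGet?_eq, PySem.Chars.pyGet?_eq_listPyGet?]
  unfold PySem.List.pyGet? PySem.List.pyIdx?
  rw [if_neg (by omega), if_pos (by omega), List.getLast?_eq_getElem?]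
  simp

lemma pyGet_zero_eq_head? (s : String) : PySem.Str.pyGet? s 0 = s.toList.head? := by
  rw [PySem.Str.pyGet?_eq, PySem.Chars.pyGet?_eq_listPyGet?]
  unfold PySem.List.pyGet? PySem.List.pyIdx?
  cases hc : s.toList with
  | nil => simp
  | cons a t => simp

-- ===== VERDICT (by name: the statement is the Claim_ definition above) =====
theorem p_q_count_spec : Claim_equal_p_q_count := by
  intro s _
  unfold Spec_p_q_count p_q_count p_q_count_alt
  by_cases he : s.toList = []
  · rw [pqLoopA, dif_neg (by simp [he])]
    simp [PySem.Str.count, PySem.Chars.count, PySem.Chars.count.go, he]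
  · have hi : 0 < s.toList.length := List.length_pos_iff.mpr he
    rw [pqLoopA_spec s.toList s.toList.length 0 0 0 rfl hi]
    have hc1 : PySem.Str.count s "1" = s.toList.count '1' := by
      rw [PySem.Str.count, show ("1" : String).toList = ['1'] from rfl, chars_count_one]
    have hc01 : PySem.Str.count s "01" = pairs01 s.toList := by
      rw [PySem.Str.count, show ("01" : String).toList = ['0','1'] from rfl, chars_count_pairs]
    rw [List.drop_zero] at *
    simp only [hc1, hc01, pyGet_neg_one_eq_getLast? s he, pyGet_zero_eq_head?]
    by_cases hW : s.toList.getLast? = some '0' ∧ s.toList.head? = some '1'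
    · rw [if_pos hW, if_pos ⟨he, hW.1, hW.2⟩]; simp
    · rw [if_neg hW, if_neg (by rintro ⟨_, a, b⟩; exact hW ⟨a, b⟩)]; simp
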